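-- pv_equiv track=rewrite | github.com/eple0329/Algorithm | 프로그래머스/unrated/135808. 과일 장수/과일 장수.py | solution
-- ===== SOURCE A (Python) =====
-- def solution(k, m, score):
--     sort_score = sorted(score)
--     answer = 0
--     while len(sort_score) >= m:
--         tmp = 1
--         a = -1
--         for i in range(m):
--             a = sort_score.pop()
--         tmp *= m * a
--         answer += tmp
--
--     return answer
-- ===== SOURCE B (Python) =====
-- def solution(k, m, score):
--     s = sorted(score)
--     n = len(score)
--     return sum(m * s[n - (i + 1) * m] for i in range(n // m))
-- ===== Notes on version B (the rewrite author's own statement) =====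
-- stated objective: simpler
-- what changed: Replaced the destructive while/pop loop (which re-pops m elements per group from a mutable list) with a single closed-form sum that indexes the sorted list once at stride m: each group's minimum sits at position n-(i+1)*m of the ascending sort, so the answer is sum(m*s[n-(i+1)*m] for i in range(n//m)).
import Mathlib
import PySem

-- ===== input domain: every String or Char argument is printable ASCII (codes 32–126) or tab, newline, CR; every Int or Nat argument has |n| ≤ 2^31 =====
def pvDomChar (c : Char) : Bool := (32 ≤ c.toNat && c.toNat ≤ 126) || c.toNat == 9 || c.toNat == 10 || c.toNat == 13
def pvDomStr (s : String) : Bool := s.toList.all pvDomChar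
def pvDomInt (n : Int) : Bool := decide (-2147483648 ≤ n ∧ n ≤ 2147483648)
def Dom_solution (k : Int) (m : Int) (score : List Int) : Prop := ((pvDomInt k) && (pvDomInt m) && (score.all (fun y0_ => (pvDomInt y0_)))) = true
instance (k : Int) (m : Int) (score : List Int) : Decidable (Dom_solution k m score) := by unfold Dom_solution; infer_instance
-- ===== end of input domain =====

-- B replaces A's destructive while/pop loop with one closed-form sum indexing the sorted list at stride m (simpler decomposition; same asymptotic cost).


-- ===== PORT A =====
-- inner 'for i in range(m): a = sort_score.pop()' — pops the last element m times, tracking a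
def solutionPopM : Nat → Int → List Int → Option (Int × List Int)
  | 0, a, xs => some (a, xs)
  | n + 1, _, xs =>
    match PySem.List.pop? xs (-1) with   -- sort_score.pop()
    | none => none                       -- IndexError (unreachable under the while-guard)
    | some (v, rest) => solutionPopM n v rest

-- the 'while len(sort_score) >= m' loop; fuel |score|+1 suffices since each pass removes
-- m ≥ 1 elements under Pre_ (for m ≤ 0 the Python loop never terminates; Pre_ excludes that)
def solutionLoop (m : Int) : Nat → List Int → Int → Int
  | 0, _, answer => answer
  | fuel + 1, xs, answer =>
    if (xs.length : Int) ≥ m then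
      match solutionPopM m.toNat (-1) xs with
      | none => answer
      | some (a, xs') =>
        let tmp : Int := 1
        let tmp := tmp * (m * a)
        solutionLoop m fuel xs' (answer + tmp)
    else answer

def solution (k : Int) (m : Int) (score : List Int) : Int :=
  let sort_score := PySem.List.sorted score (fun x => x) false
  solutionLoop m (score.length + 1) sort_score 0

-- ===== PORT B =====
def solution_alt (k : Int) (m : Int) (score : List Int) : Int :=
  let s := PySem.List.sorted score (fun x => x) false
  let n : Int := score.length
  (PySem.List.pyRange 0 (PySem.Int.floordiv n m) 1).foldl
    (fun acc i => acc + m * PySem.List.pyGetD s (n - (i + 1) * m) 0) 0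

-- ===== PRECONDITION & SPEC =====
-- Pre_ excludes m ≤ 0: there A's 'while len(sort_score) >= m' loop never terminates (A returns nothing).
def Pre_solution (k : Int) (m : Int) (score : List Int) : Prop := 1 ≤ m
instance (k : Int) (m : Int) (score : List Int) : Decidable (Pre_solution k m score) := by unfold Pre_solution; infer_instance
def pvWitness_solution : Int × Int × List Int := (4, 2, [1, 2, 3, 1, 2])

def Spec_solution (k : Int) (m : Int) (score : List Int) (out : Int) : Prop := out = solution_alt k m score
instance (k : Int) (m : Int) (score : List Int) (out : Int) : Decidable (Spec_solution k m score out) := by unfold Spec_solution; infer_instance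

-- ===== CLAIM (what is proved, stated in full; the proofs are below) =====
def Claim_equal_solution : Prop := ∀ (k : Int) (m : Int) (score : List Int), Dom_solution k m score → Pre_solution k m score → Spec_solution k m score (solution k m score)

-- ===== LEMMAS AND PROOFS =====

-- the common value of both sides, as a Nat-indexed sum over the sorted list
def bsumN (m : Int) (xs : List Int) : Int :=
  ((List.range (xs.length / m.toNat)).map
    (fun i => m * xs.getD (xs.length - (i + 1) * m.toNat) 0)).sum

-- popping c ≥ 1 times from a list of length ≥ c ends at element length-c and leaves that prefix
theorem solutionPopM_spec (c : Nat) (a : Int) (xs : List Int) (h1 : 1 ≤ c) (h2 : c ≤ xs.length) :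
    solutionPopM c a xs = some (xs.getD (xs.length - c) 0, xs.take (xs.length - c)) := by
  induction c generalizing a xs with
  | zero => omega
  | succ c ih =>
    rcases List.eq_nil_or_concat xs with rfl | ⟨ys, x, rfl⟩
    · simp at h2
    · rw [List.concat_eq_append] at *
      simp only [solutionPopM, PySem.List.pop?_last]
      rcases Nat.eq_zero_or_pos c with rfl | hc
      · simp [solutionPopM, List.getD]
      · have hlen : c ≤ ys.length := by simp at h2; omega
        rw [ih x ys hc hlen]
        have hidx : (ys ++ [x]).length - (c + 1) = ys.length - c := by
          simp only [List.length_append, List.length_singleton]; omega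
        have hlt : ys.length - c < ys.length := by omega
        rw [hidx, List.take_append_of_le_length (by omega)]
        simp [List.getD, List.getElem_append_left hlt, List.getElem?_eq_getElem hlt]

theorem foldl_add_sum {α : Type} (l : List α) (f : α → Int) (a : Int) :
    l.foldl (fun acc x => acc + f x) a = a + (l.map f).sum := by
  induction l generalizing a with
  | nil => simp
  | cons x t ih => simp [List.foldl_cons, ih]; ring

theorem getD_take_lt (l : List Int) (n j : Nat) (h : j < n) :
    (l.take n).getD j 0 = l.getD j 0 := by
  simp [List.getD, h]

-- A's loop equals the stride-m sum over its (remaining) list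
theorem solutionLoop_spec (m : Int) (hm : 1 ≤ m) (fuel : Nat) (xs : List Int) (ans : Int)
    (hf : xs.length < fuel) : solutionLoop m fuel xs ans = ans + bsumN m xs := by
  induction fuel generalizing xs ans with
  | zero => omega
  | succ fuel ih =>
    have hmN : 1 ≤ m.toNat := by omega
    have hmc : (m.toNat : Int) = m := by omega
    rw [solutionLoop]
    by_cases hge : (xs.length : Int) ≥ m
    · rw [if_pos hge]
      have hle : m.toNat ≤ xs.length := by omega
      rw [solutionPopM_spec m.toNat (-1) xs hmN hle]
      have hlen' : (xs.take (xs.length - m.toNat)).length = xs.length - m.toNat := by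
        simp
      show solutionLoop m fuel (xs.take (xs.length - m.toNat))
          (ans + 1 * (m * xs.getD (xs.length - m.toNat) 0)) = ans + bsumN m xs
      rw [ih _ _ (by rw [hlen']; omega)]
      have hg : xs.length / m.toNat = (xs.length - m.toNat) / m.toNat + 1 :=
        Nat.div_eq_sub_div hmN hle
      have key : bsumN m xs
          = m * xs.getD (xs.length - m.toNat) 0 + bsumN m (xs.take (xs.length - m.toNat)) := by
        unfold bsumN
        rw [hlen', hg, List.range_succ_eq_map]
        simp only [List.map_cons, List.map_map, List.sum_cons]
        congr 1
        · simp
        · apply congrArg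
          apply List.map_congr_left
          intro i hi
          rw [List.mem_range] at hi
          have hib : (i + 1) * m.toNat ≤ xs.length - m.toNat :=
            (Nat.le_div_iff_mul_le hmN).1 (by omega)
          have e1 : xs.length - (Nat.succ i + 1) * m.toNat
              = xs.length - m.toNat - (i + 1) * m.toNat := by
            have : (Nat.succ i + 1) * m.toNat = m.toNat + (i + 1) * m.toNat := by
              simp [Nat.succ_eq_add_one]; ring
            omega
          have hpos : 1 ≤ (i + 1) * m.toNat := Nat.mul_pos (by omega) (by omega)
          have hjlt : xs.length - m.toNat - (i + 1) * m.toNat < xs.length - m.toNat := by omega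
          simp only [Function.comp, e1]
          rw [getD_take_lt _ _ _ hjlt]
      rw [key]; ring
    · rw [if_neg hge]
      have : xs.length < m.toNat := by omega
      unfold bsumN
      rw [Nat.div_eq_of_lt this]
      simp

-- B's fold equals the same stride-m sum over the sorted list
theorem bsumN_eq_alt (m : Int) (hm : 1 ≤ m) (k : Int) (score : List Int) :
    solution_alt k m score = bsumN m (PySem.List.sorted score (fun x => x) false) := by
  have hmc : ((m.toNat : Int)) = m := by omega
  have hmN : 1 ≤ m.toNat := by omega
  unfold bsumN
  rw [PySem.List.length_sorted]
  show (PySem.List.pyRange 0 (PySem.Int.floordiv ((score.length : Nat) : Int) m) 1).foldl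
      (fun acc i => acc + m * PySem.List.pyGetD (PySem.List.sorted score (fun x => x) false)
        (((score.length : Nat) : Int) - (i + 1) * m) 0) 0 = _
  have hfd : PySem.Int.floordiv ((score.length : Nat) : Int) m
      = ((score.length / m.toNat : Nat) : Int) := by
    rw [← hmc]; exact PySem.Int.floordiv_natCast _ _
  rw [hfd, PySem.List.pyRange_zero_natCast, List.foldl_map,
    foldl_add_sum (List.range (score.length / m.toNat))
      (fun i => m * PySem.List.pyGetD (PySem.List.sorted score (fun x => x) false)
        ((score.length : Int) - ((i : Int) + 1) * m) 0) 0]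
  rw [zero_add]
  apply congrArg
  apply List.map_congr_left
  intro i hi
  rw [List.mem_range] at hi
  have hib : (i + 1) * m.toNat ≤ score.length := (Nat.le_div_iff_mul_le hmN).1 (by omega)
  have hidx : ((score.length : Nat) : Int) - ((i : Int) + 1) * m
      = ((score.length - (i + 1) * m.toNat : Nat) : Int) := by
    have h := hib
    have : ((score.length - (i + 1) * m.toNat : Nat) : Int)
        = ((score.length : Nat) : Int) - ((i : Int) + 1) * ((m.toNat : Nat) : Int) := by
      push_cast [h]; ring
    rw [hmc] at this
    exact this.symm
  rw [hidx, PySem.List.pyGetD_natCast]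

-- ===== VERDICT (by name: the statement is the Claim_ definition above) =====
theorem solution_spec : Claim_equal_solution := by
  intro k m score _ hpre
  unfold Spec_solution
  rw [bsumN_eq_alt m hpre k score]
  show solutionLoop m (score.length + 1) (PySem.List.sorted score (fun x => x) false) 0
      = bsumN m (PySem.List.sorted score (fun x => x) false)
  rw [solutionLoop_spec m hpre _ _ 0 (by rw [PySem.List.length_sorted]; omega), zero_add]
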